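-- pv_equiv track=rewrite | github.com/Ahmed6531/Stories-cafe-chatbot | chatbot/app/services/compiler.py | _split_legacy_modifier_buckets
-- ===== SOURCE A (Python) =====
-- def _split_legacy_modifier_buckets(modifiers: list[str]) -> tuple[str | None, str | None, list[str]]:
--     size_words = {"small", "medium", "large", "regular", "tall", "grande", "venti", "short", "xl", "extra large"}
--     size = None
--     milk = None
--     addons: list[str] = []
--     for modifier in modifiers:
--         cleaned = str(modifier).strip()
--         lowered = cleaned.lower()
--         if not cleaned:
--             continue
--         if size is None and lowered in size_words:
--             size = cleaned
--         elif milk is None and "milk" in lowered: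
--             milk = cleaned
--         else:
--             addons.append(cleaned)
--     return size, milk, addons
-- ===== SOURCE B (Python) =====
-- SIZE_WORDS = {"small", "medium", "large", "regular", "tall", "grande", "venti", "short", "xl", "extra large"}
--
--
-- def _split_legacy_modifier_buckets(modifiers: list[str]) -> tuple[str | None, str | None, list[str]]:
--     clean = [c for c in (str(m).strip() for m in modifiers) if c]
--     size = next((c for c in clean if c.lower() in SIZE_WORDS), None)
--     milk = next((c for c in clean if "milk" in c.lower()), None)
--     addons = list(clean)
--     if size is not None:
--         addons.remove(size)
--     if milk is not None:
--         addons.remove(milk)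
--     return size, milk, addons
-- ===== Notes on version B (the rewrite author's own statement) =====
-- stated objective: alternative
-- what changed: Replaces A's single stateful scan (mutable size/milk slots with a three-way branch per element) by a clean-then-three-independent-passes decomposition: first-match searches for size and milk over the cleaned list plus removal of those two first matches, exploiting that the size and milk predicates are disjoint.
import Mathlib
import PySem

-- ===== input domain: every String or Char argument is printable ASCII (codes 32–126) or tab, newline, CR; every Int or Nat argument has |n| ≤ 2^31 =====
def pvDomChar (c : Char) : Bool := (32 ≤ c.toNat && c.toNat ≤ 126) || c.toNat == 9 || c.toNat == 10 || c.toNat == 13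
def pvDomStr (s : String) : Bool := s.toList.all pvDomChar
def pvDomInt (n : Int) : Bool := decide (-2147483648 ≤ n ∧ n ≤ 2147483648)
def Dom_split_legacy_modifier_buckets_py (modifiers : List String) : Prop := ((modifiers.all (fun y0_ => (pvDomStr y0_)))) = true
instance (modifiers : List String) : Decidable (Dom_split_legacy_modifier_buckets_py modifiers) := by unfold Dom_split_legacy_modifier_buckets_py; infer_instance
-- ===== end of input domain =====

-- B replaces A's single stateful scan by a different decomposition: clean once, two independent
-- first-match searches (size / milk) over the cleaned list, then removal of those two first
-- matches; same cost, equivalence proved exactly (return value only; neither mutates its input).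

-- The size-word set (a module/function-level literal in both Pythons)
def pvSizeWords : PySem.Set String :=
  PySem.Set.ofList ["small", "medium", "large", "regular", "tall", "grande", "venti", "short", "xl", "extra large"]

-- 'cleaned.lower() in size_words'
def pvIsSize (c : String) : Bool := PySem.Set.contains pvSizeWords (PySem.Str.lower c)
-- '"milk" in cleaned.lower()'
def pvIsMilk (c : String) : Bool := PySem.Str.isIn "milk" (PySem.Str.lower c)

-- ===== PORT A =====
-- one loop iteration of A
def pvStepA (st : Option String × Option String × List String) (modifier : String) :
    Option String × Option String × List String :=
  let cleaned := PySem.Str.strip modifier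
  if cleaned = "" then st
  else if st.1 = none ∧ pvIsSize cleaned = true then (some cleaned, st.2.1, st.2.2)
  else if st.2.1 = none ∧ pvIsMilk cleaned = true then (st.1, some cleaned, st.2.2)
  else (st.1, st.2.1, st.2.2 ++ [cleaned])

def split_legacy_modifier_buckets_py (modifiers : List String) : Option String × Option String × List String :=
  modifiers.foldl pvStepA (none, none, [])

-- ===== PORT B =====
def split_legacy_modifier_buckets_py_alt (modifiers : List String) : Option String × Option String × List String :=
  let clean := (modifiers.map PySem.Str.strip).filter (· != "")
  let size := clean.find? pvIsSize
  let milk := clean.find? pvIsMilk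
  let addons := clean
  let addons := match size with
    | none => addons
    | some s => (PySem.List.remove? addons s).getD addons   -- addons.remove(size); the element is present
  let addons := match milk with
    | none => addons
    | some m => (PySem.List.remove? addons m).getD addons   -- addons.remove(milk); the element is present
  (size, milk, addons)

-- ===== PRECONDITION & SPEC =====
def Spec_split_legacy_modifier_buckets_py (modifiers : List String) (out : Option String × Option String × List String) : Prop := out = split_legacy_modifier_buckets_py_alt modifiers
instance (modifiers : List String) (out : Option String × Option String × List String) : Decidable (Spec_split_legacy_modifier_buckets_py modifiers out) := by unfold Spec_split_legacy_modifier_buckets_py; infer_instance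

-- ===== CLAIM (what is proved, stated in full; the proofs are below) =====
def Claim_equal_split_legacy_modifier_buckets_py : Prop := ∀ (modifiers : List String), Dom_split_legacy_modifier_buckets_py modifiers → Spec_split_legacy_modifier_buckets_py modifiers (split_legacy_modifier_buckets_py modifiers)

-- ===== LEMMAS AND PROOFS =====

-- The size predicate and the milk predicate are disjoint (no size word contains "milk").
lemma pv_disj (c : String) (h : pvIsSize c = true) : pvIsMilk c = false := by
  unfold pvIsSize at h
  rw [PySem.Set.contains_iff] at h
  simp [pvSizeWords, PySem.Set.mem_ofList] at h
  unfold pvIsMilk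
  rcases h with h|h|h|h|h|h|h|h|h|h <;> rw [h] <;> decide

-- A's step on an already-cleaned (stripped) string
def pvCoreA (st : Option String × Option String × List String) (cleaned : String) :
    Option String × Option String × List String :=
  if cleaned = "" then st
  else if st.1 = none ∧ pvIsSize cleaned = true then (some cleaned, st.2.1, st.2.2)
  else if st.2.1 = none ∧ pvIsMilk cleaned = true then (st.1, some cleaned, st.2.2)
  else (st.1, st.2.1, st.2.2 ++ [cleaned])

lemma fold_core_filter (l : List String) (st : Option String × Option String × List String) :
    l.foldl pvCoreA st = (l.filter (· != "")).foldl pvCoreA st := by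
  induction l generalizing st with
  | nil => rfl
  | cons c cs ih =>
    by_cases hc : c = ""
    · subst hc; simpa [pvCoreA] using ih st
    · simp [hc, List.foldl_cons, ih]

-- evaluation of one step in each state
lemma core_both (s m : String) (acc : List String) (c : String) (hc : c ≠ "") :
    pvCoreA (some s, some m, acc) c = (some s, some m, acc ++ [c]) := by
  simp [pvCoreA, hc]

lemma core_size_pos (s : String) (acc : List String) (c : String) (hc : c ≠ "")
    (hq : pvIsMilk c = true) : pvCoreA (some s, none, acc) c = (some s, some c, acc) := by
  simp [pvCoreA, hc, hq]

lemma core_size_neg (s : String) (acc : List String) (c : String) (hc : c ≠ "")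
    (hq : pvIsMilk c = false) : pvCoreA (some s, none, acc) c = (some s, none, acc ++ [c]) := by
  simp [pvCoreA, hc, hq]

lemma core_milk_pos (m : String) (acc : List String) (c : String) (hc : c ≠ "")
    (hp : pvIsSize c = true) : pvCoreA (none, some m, acc) c = (some c, some m, acc) := by
  simp [pvCoreA, hc, hp]

lemma core_milk_neg (m : String) (acc : List String) (c : String) (hc : c ≠ "")
    (hp : pvIsSize c = false) : pvCoreA (none, some m, acc) c = (none, some m, acc ++ [c]) := by
  simp [pvCoreA, hc, hp]

lemma core_none_size (acc : List String) (c : String) (hc : c ≠ "")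
    (hp : pvIsSize c = true) : pvCoreA (none, none, acc) c = (some c, none, acc) := by
  simp [pvCoreA, hc, hp]

lemma core_none_milk (acc : List String) (c : String) (hc : c ≠ "")
    (hp : pvIsSize c = false) (hq : pvIsMilk c = true) :
    pvCoreA (none, none, acc) c = (none, some c, acc) := by
  simp [pvCoreA, hc, hp, hq]

lemma core_none_else (acc : List String) (c : String) (hc : c ≠ "")
    (hp : pvIsSize c = false) (hq : pvIsMilk c = false) :
    pvCoreA (none, none, acc) c = (none, none, acc ++ [c]) := by
  simp [pvCoreA, hc, hp, hq]

lemma fold_both_set (l : List String) (h : ∀ c ∈ l, c ≠ "")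
    (s m : String) (acc : List String) :
    l.foldl pvCoreA (some s, some m, acc) = (some s, some m, acc ++ l) := by
  induction l generalizing acc with
  | nil => simp
  | cons c cs ih =>
    have hc : c ≠ "" := h c (List.mem_cons_self ..)
    have h' : ∀ x ∈ cs, x ≠ "" := fun x hx => h x (List.mem_cons_of_mem _ hx)
    rw [List.foldl_cons, core_both s m acc c hc, ih h' (acc ++ [c])]
    simp

lemma fold_size_set (l : List String) (h : ∀ c ∈ l, c ≠ "")
    (s : String) (acc : List String) :
    l.foldl pvCoreA (some s, none, acc) = (some s, l.find? pvIsMilk, acc ++ l.eraseP pvIsMilk) := by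
  induction l generalizing acc with
  | nil => simp
  | cons c cs ih =>
    have hc : c ≠ "" := h c (List.mem_cons_self ..)
    have h' : ∀ x ∈ cs, x ≠ "" := fun x hx => h x (List.mem_cons_of_mem _ hx)
    by_cases hq : pvIsMilk c = true
    · rw [List.foldl_cons, core_size_pos s acc c hc hq, fold_both_set cs h' s c acc]
      simp [List.find?_cons_of_pos hq, hq]
    · rw [List.foldl_cons, core_size_neg s acc c hc (by simpa using hq), ih h' (acc ++ [c])]
      simp [List.find?_cons_of_neg (by simpa using hq), hq]

lemma fold_milk_set (l : List String) (h : ∀ c ∈ l, c ≠ "")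
    (m : String) (acc : List String) :
    l.foldl pvCoreA (none, some m, acc) = (l.find? pvIsSize, some m, acc ++ l.eraseP pvIsSize) := by
  induction l generalizing acc with
  | nil => simp
  | cons c cs ih =>
    have hc : c ≠ "" := h c (List.mem_cons_self ..)
    have h' : ∀ x ∈ cs, x ≠ "" := fun x hx => h x (List.mem_cons_of_mem _ hx)
    by_cases hp : pvIsSize c = true
    · rw [List.foldl_cons, core_milk_pos m acc c hc hp, fold_both_set cs h' c m acc]
      simp [List.find?_cons_of_pos hp, hp]
    · rw [List.foldl_cons, core_milk_neg m acc c hc (by simpa using hp), ih h' (acc ++ [c])]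
      simp [List.find?_cons_of_neg (by simpa using hp), hp]

lemma fold_none (l : List String) (h : ∀ c ∈ l, c ≠ "") (acc : List String) :
    l.foldl pvCoreA (none, none, acc) =
      (l.find? pvIsSize, l.find? pvIsMilk, acc ++ (l.eraseP pvIsSize).eraseP pvIsMilk) := by
  induction l generalizing acc with
  | nil => simp
  | cons c cs ih =>
    have hc : c ≠ "" := h c (List.mem_cons_self ..)
    have h' : ∀ x ∈ cs, x ≠ "" := fun x hx => h x (List.mem_cons_of_mem _ hx)
    by_cases hp : pvIsSize c = true
    · have hq : pvIsMilk c = false := pv_disj c hp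
      have hq2 : ¬ pvIsMilk c = true := by simp [hq]
      rw [List.foldl_cons, core_none_size acc c hc hp, fold_size_set cs h' c acc]
      simp [List.find?_cons_of_pos hp, List.find?_cons_of_neg hq2, hp]
    · have hp' : pvIsSize c = false := by simpa using hp
      by_cases hq : pvIsMilk c = true
      · rw [List.foldl_cons, core_none_milk acc c hc hp' hq, fold_milk_set cs h' c acc]
        simp [List.find?_cons_of_neg hp, List.find?_cons_of_pos hq, hp', hq]
      · have hq' : pvIsMilk c = false := by simpa using hq
        rw [List.foldl_cons, core_none_else acc c hc hp' hq', ih h' (acc ++ [c])]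
        simp [List.find?_cons_of_neg hp, List.find?_cons_of_neg hq, hp', hq']

-- removing (by equality) the first element found by a predicate = eraseP of that predicate
lemma remove_find (p : String → Bool) (l : List String) (s : String)
    (h : l.find? p = some s) : PySem.List.remove? l s = some (l.eraseP p) := by
  induction l with
  | nil => simp at h
  | cons c cs ih =>
    by_cases hp : p c = true
    · rw [List.find?_cons_of_pos hp] at h
      injection h with h; subst h
      simp [hp]
    · rw [List.find?_cons_of_neg (by simpa using hp)] at h
      have hne : c ≠ s := by
        intro he; subst he
        exact hp (List.find?_some h)
      rw [PySem.List.remove?_cons_of_ne cs hne, ih h]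
      simp [hp]

-- erasing the first size match does not disturb the first milk match (disjoint predicates)
lemma find_milk_eraseP (l : List String) :
    (l.eraseP pvIsSize).find? pvIsMilk = l.find? pvIsMilk := by
  induction l with
  | nil => rfl
  | cons c cs ih =>
    by_cases hp : pvIsSize c = true
    · have hq : pvIsMilk c = false := pv_disj c hp
      have hq2 : ¬ pvIsMilk c = true := by simp [hq]
      simp [hp, List.find?_cons_of_neg hq2]
    · by_cases hq : pvIsMilk c = true
      · simp [hp, List.find?_cons_of_pos hq]
      · simp [hp, List.find?_cons_of_neg hq, ih]

lemma eraseP_of_find_none (p : String → Bool) (l : List String) (h : l.find? p = none) :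
    l.eraseP p = l :=
  List.eraseP_of_forall_not (by
    intro a ha
    exact (List.find?_eq_none.mp h) a ha)

-- ===== VERDICT (by name: the statement is the Claim_ definition above) =====
theorem split_legacy_modifier_buckets_py_spec : Claim_equal_split_legacy_modifier_buckets_py := by
  intro modifiers _
  unfold Spec_split_legacy_modifier_buckets_py
  unfold split_legacy_modifier_buckets_py split_legacy_modifier_buckets_py_alt
  have hstep : modifiers.foldl pvStepA (none, none, []) =
      (modifiers.map PySem.Str.strip).foldl pvCoreA (none, none, []) := by
    rw [List.foldl_map]
    rfl
  set clean := (modifiers.map PySem.Str.strip).filter (· != "") with hclean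
  have hne : ∀ c ∈ clean, c ≠ "" := by
    intro c hcm
    have := List.of_mem_filter hcm
    simpa using this
  rw [hstep, fold_core_filter, ← hclean, fold_none clean hne []]
  simp only [List.nil_append]
  cases hfp : clean.find? pvIsSize with
  | none =>
    rw [eraseP_of_find_none pvIsSize clean hfp]
    cases hfq : clean.find? pvIsMilk with
    | none => rw [eraseP_of_find_none pvIsMilk clean hfq]
    | some m =>
      dsimp only
      rw [remove_find pvIsMilk clean m hfq]
      rfl
  | some s =>
    cases hfq : clean.find? pvIsMilk with
    | none =>
      dsimp only
      rw [remove_find pvIsSize clean s hfp]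
      dsimp only [Option.getD_some]
      rw [eraseP_of_find_none pvIsMilk (clean.eraseP pvIsSize)
        (by rw [find_milk_eraseP]; exact hfq)]
    | some m =>
      dsimp only
      rw [remove_find pvIsSize clean s hfp]
      dsimp only [Option.getD_some]
      rw [remove_find pvIsMilk (clean.eraseP pvIsSize) m
        (by rw [find_milk_eraseP]; exact hfq)]
      rfl
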